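-- pv_equiv track=rewrite | github.com/tomipro/Info-Gral | Parcialito 3/IG.21.1C.GT.RPP3.T1.py | listita
-- ===== SOURCE A (Python) =====
-- def esLetra(car):
--     return True if (car >= "a" and car <= "z") or (car >= "A" and car <= "Z") else False
--
-- def esVocal(car):
--     return True if (car in "aeiouAEIOU") else False
--
-- def listita(txt):
--     i = 0
--     lst = []
--     while i < len(txt):
--         while i < len(txt) and not esLetra(txt[i]):
--             i += 1
--         pal = ""
--         cont = 0
--         while i < len(txt) and esLetra(txt[i]):
--             if esVocal(txt[i]):
--                 cont += 1
--             pal += txt[i]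
--             i += 1
--         if cont > 3:
--             lst.append(pal)
--     return lst
-- ===== SOURCE B (Python) =====
-- def listita(txt):
--     words = []
--     cur = []
--     for c in txt:
--         if ('a' <= c <= 'z') or ('A' <= c <= 'Z'):
--             cur.append(c)
--         elif cur:
--             words.append(''.join(cur))
--             cur = []
--     if cur:
--         words.append(''.join(cur))
--     return [w for w in words if sum(c in "aeiouAEIOU" for c in w) > 3]
-- ===== Notes on version B (the rewrite author's own statement) =====
-- stated objective: faster
-- what changed: Replaces the index-based nested while-loop state machine (skip/collect with inline vowel counter and quadratic string concatenation pal += c) by a single for-each tokenizer buffering letter runs in a list joined once, followed by a comprehension filtering words with more than 3 vowels.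
import Mathlib
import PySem

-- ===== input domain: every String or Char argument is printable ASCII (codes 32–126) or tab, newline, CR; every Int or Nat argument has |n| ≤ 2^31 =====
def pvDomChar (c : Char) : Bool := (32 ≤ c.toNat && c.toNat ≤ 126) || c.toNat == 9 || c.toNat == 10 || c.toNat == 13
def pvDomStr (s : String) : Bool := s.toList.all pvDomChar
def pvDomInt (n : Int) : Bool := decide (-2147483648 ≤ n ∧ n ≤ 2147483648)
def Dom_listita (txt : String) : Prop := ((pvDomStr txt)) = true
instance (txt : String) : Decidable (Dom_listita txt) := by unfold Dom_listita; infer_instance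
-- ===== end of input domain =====

-- B replaces A's index-based nested-while state machine (with quadratic pal += c string building)
-- by a one-pass tokenizer buffering letter runs, then a filter of words with more than 3 vowels
-- (measured faster in a timing run).

-- shared character tests, literal ports of esLetra / esVocal
def esLetra (car : Char) : Bool := ('a' ≤ car && car ≤ 'z') || ('A' ≤ car && car ≤ 'Z')
def esVocal (car : Char) : Bool := car ∈ "aeiouAEIOU".toList

-- ===== PORT A =====
-- inner while: skip non-letters
def skipA : List Char → List Char
  | [] => []
  | c :: cs => if !esLetra c then skipA cs else c :: cs

-- inner while: collect a letter run into pal, counting vowels in cont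
def wordA : List Char → List Char → Int → List Char × Int × List Char
  | [], pal, cont => (pal, cont, [])
  | c :: cs, pal, cont =>
    if esLetra c then wordA cs (pal ++ [c]) (if esVocal c then cont + 1 else cont)
    else (pal, cont, c :: cs)

theorem skipA_len : ∀ cs : List Char, (skipA cs).length ≤ cs.length
  | [] => le_refl _
  | c :: cs => by
    simp only [skipA]; split
    · exact le_trans (skipA_len cs) (Nat.le_succ _)
    · exact le_refl _

theorem wordA_len : ∀ (cs pal : List Char) (cont : Int),
    (wordA cs pal cont).2.2.length ≤ cs.length
  | [], _, _ => Nat.le_refl _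
  | c :: cs, pal, cont => by
    simp only [wordA]; split
    · exact le_trans (wordA_len cs _ _) (Nat.le_succ _)
    · exact le_refl _

-- outer while loop
def outerA : List Char → List String → List String
  | [], lst => lst
  | c :: cs, lst =>
    let cs1 := skipA (c :: cs)
    let r := wordA cs1 [] 0
    outerA r.2.2 (if r.2.1 > 3 then lst ++ [String.mk r.1] else lst)
  termination_by cs => cs.length
  decreasing_by
    simp only [skipA]
    split
    · exact Nat.lt_succ_of_le (le_trans (wordA_len _ _ _) (skipA_len cs))
    · rename_i hc
      simp only [wordA, Bool.not_eq_true', Bool.not_eq_false] at hc ⊢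
      rw [if_pos hc]
      exact Nat.lt_succ_of_le (wordA_len cs _ _)

def listita (txt : String) : List String := outerA txt.toList []

-- ===== PORT B =====
-- tokenizer: one pass, buffering the current letter run in cur
def tokB : List Char → List Char → List (List Char)
  | [], cur => if cur = [] then [] else [cur]
  | c :: cs, cur =>
    if esLetra c then tokB cs (cur ++ [c])
    else if cur = [] then tokB cs [] else cur :: tokB cs []

-- sum(c in "aeiouAEIOU" for c in w)
def countV (w : List Char) : Int := ((w.filter esVocal).length : Int)

def listita_alt (txt : String) : List String :=
  ((tokB txt.toList []).filter (fun w => countV w > 3)).map String.mk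

-- ===== PRECONDITION & SPEC =====
def Spec_listita (txt : String) (out : List String) : Prop := out = listita_alt txt
instance (txt : String) (out : List String) : Decidable (Spec_listita txt out) := by unfold Spec_listita; infer_instance

-- ===== CLAIM (what is proved, stated in full; the proofs are below) =====
def Claim_equal_listita : Prop := ∀ (txt : String), Dom_listita txt → Spec_listita txt (listita txt)

-- ===== LEMMAS AND PROOFS =====

theorem wordA_spec : ∀ (cs pal : List Char) (cont : Int),
    wordA cs pal cont =
      (pal ++ cs.takeWhile esLetra, cont + countV (cs.takeWhile esLetra), cs.dropWhile esLetra)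
  | [], pal, cont => by simp [wordA, countV]
  | c :: cs, pal, cont => by
    by_cases h : esLetra c = true
    · rw [show wordA (c :: cs) pal cont
          = wordA cs (pal ++ [c]) (if esVocal c then cont + 1 else cont) by
            simp [wordA, h]]
      rw [wordA_spec cs]
      simp [List.takeWhile, List.dropWhile, h, countV]
      by_cases hv : esVocal c = true <;> simp [hv] <;> ring
    · simp [wordA, h, List.takeWhile, List.dropWhile, countV]

theorem tokB_nonletter (c : Char) (cs : List Char) (h : ¬ esLetra c = true) :
    tokB (c :: cs) [] = tokB cs [] := by simp [tokB, h]

theorem tokB_run : ∀ (cs cur : List Char), cur ≠ [] →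
    tokB cs cur = (cur ++ cs.takeWhile esLetra) :: tokB (cs.dropWhile esLetra) []
  | [], cur, h => by simp [tokB, h]
  | c :: cs, cur, h => by
    by_cases hc : esLetra c = true
    · rw [show tokB (c :: cs) cur = tokB cs (cur ++ [c]) by simp [tokB, hc]]
      rw [tokB_run cs (cur ++ [c]) (by simp)]
      simp [List.takeWhile, List.dropWhile, hc]
    · simp only [tokB, hc, if_neg, if_false, Bool.false_eq_true]
      rw [if_neg h]
      simp [List.takeWhile, List.dropWhile, hc, tokB_nonletter]

def Bres (cs : List Char) : List String :=
  ((tokB cs []).filter (fun w => countV w > 3)).map String.mk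

theorem dropWhile_len (p : Char → Bool) : ∀ cs : List Char, (cs.dropWhile p).length ≤ cs.length
  | [] => le_refl _
  | c :: cs => by
    simp only [List.dropWhile]; split
    · exact le_trans (dropWhile_len p cs) (Nat.le_succ _)
    · exact le_refl _

theorem outerA_eq_aux : ∀ (n : Nat) (cs : List Char), cs.length ≤ n → ∀ (lst : List String),
    outerA cs lst = lst ++ Bres cs
  | _, [], _, lst => by simp [outerA, Bres, tokB]
  | n + 1, c :: cs, hn, lst => by
    by_cases hc : esLetra c = true
    · have hskip : skipA (c :: cs) = c :: cs := by simp [skipA, hc]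
      rw [outerA, hskip, wordA_spec]
      have hlt : ((c :: cs).dropWhile esLetra).length ≤ n := by
        have h1 : (cs.dropWhile esLetra).length ≤ cs.length := dropWhile_len esLetra cs
        simp only [List.dropWhile, hc, if_pos]
        simp only [List.length_cons] at hn
        omega
      rw [outerA_eq_aux n ((c :: cs).dropWhile esLetra) hlt]
      have htok : tokB (c :: cs) [] =
          ((c :: cs).takeWhile esLetra) :: tokB ((c :: cs).dropWhile esLetra) [] := by
        rw [show tokB (c :: cs) [] = tokB cs [c] by simp [tokB, hc]]
        rw [tokB_run cs [c] (by simp)]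
        simp [List.takeWhile, List.dropWhile, hc]
      simp only [Bres, htok, List.filter, List.nil_append, zero_add]
      by_cases hp : countV ((c :: cs).takeWhile esLetra) > 3
      · simp [hp, decide_eq_true_eq]
      · simp [hp, decide_eq_true_eq]
    · have hskip : skipA (c :: cs) = skipA cs := by simp [skipA, hc]
      have houter : outerA (c :: cs) lst = outerA cs lst := by
        cases cs with
        | nil => rw [outerA]; simp [skipA, hc, wordA, outerA]
        | cons d ds => rw [outerA, outerA, hskip]
      have hle : cs.length ≤ n := by simp only [List.length_cons] at hn; omega
      rw [houter, outerA_eq_aux n cs hle, Bres, Bres, tokB_nonletter c cs hc]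

theorem outerA_eq (cs : List Char) (lst : List String) : outerA cs lst = lst ++ Bres cs :=
  outerA_eq_aux cs.length cs (le_refl _) lst

-- ===== VERDICT (by name: the statement is the Claim_ definition above) =====
theorem listita_spec : Claim_equal_listita := by
  intro txt _
  unfold Spec_listita listita listita_alt
  rw [outerA_eq]
  simp [Bres]
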